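-- pv_equiv track=rewrite | github.com/definitelynotrussellkirk-bit/binarySKILL | generators/distributions.py | validate_distribution
-- ===== SOURCE A (Python) =====
-- from typing import List, Dict, Any
--
-- def validate_distribution(dist: List[int], n: int, k: int) -> bool:
--     """
--     Check if a list is a valid distribution of n into k bins.
--
--     Args:
--         dist: Proposed distribution
--         n: Expected total
--         k: Expected number of bins
--
--     Returns:
--         True if valid
--
--     Examples:
--         >>> validate_distribution([3, 2, 5], 10, 3)
--         True
--         >>> validate_distribution([3, 2, 5], 11, 3)
--         False
--         >>> validate_distribution([3, 2], 5, 3)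
--         False
--     """
--     if len(dist) != k:
--         return False
--     if sum(dist) != n:
--         return False
--     if any(x < 0 for x in dist):
--         return False
--     return True
-- ===== SOURCE B (Python) =====
-- def validate_distribution(dist, n, k):
--     # A list is a valid distribution of n into k bins iff its prefix-sum
--     # sequence [0, d0, d0+d1, ...] has k+1 entries, is nondecreasing
--     # (<=> every entry of dist is nonnegative), and ends at n (<=> sum == n).
--     prefix = [0]
--     for x in dist:
--         prefix.append(prefix[-1] + x)
--     return len(prefix) == k + 1 and prefix[-1] == n and prefix == sorted(prefix)
-- ===== Notes on version B (the rewrite author's own statement) =====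
-- stated objective: alternative
-- what changed: B validates via a derived data structure: it builds the prefix-sum sequence and checks it has k+1 entries, ends at n, and is nondecreasing (equality with its own sort), instead of A's three direct scans (len, sum, any-negative).
import Mathlib
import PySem

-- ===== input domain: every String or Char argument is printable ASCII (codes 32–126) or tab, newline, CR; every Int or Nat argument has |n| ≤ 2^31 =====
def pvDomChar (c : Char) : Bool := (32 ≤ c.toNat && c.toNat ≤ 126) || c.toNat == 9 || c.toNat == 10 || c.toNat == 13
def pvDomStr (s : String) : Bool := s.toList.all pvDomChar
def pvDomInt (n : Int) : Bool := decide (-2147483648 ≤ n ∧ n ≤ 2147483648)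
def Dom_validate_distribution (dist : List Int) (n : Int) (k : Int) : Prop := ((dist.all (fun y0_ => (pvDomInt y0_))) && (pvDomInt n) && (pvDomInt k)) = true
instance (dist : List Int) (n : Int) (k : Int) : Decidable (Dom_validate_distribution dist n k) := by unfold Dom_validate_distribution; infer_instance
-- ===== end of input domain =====

-- B validates via the prefix-sum sequence (length k+1, nondecreasing, ends at n) instead of A's three direct scans (objective: alternative).

-- ===== PORT A =====
def validate_distribution (dist : List Int) (n : Int) (k : Int) : Bool :=
  if (dist.length : Int) ≠ k then false
  else if dist.foldl (· + ·) 0 ≠ n then false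
  else if dist.any (fun x => x < 0) then false
  else true

-- ===== PORT B =====
-- loop body: prefix.append(prefix[-1] + x); the accumulator list always contains 0,
-- so prefix[-1] (PySem.List.pyGet? acc (-1)) is never none and .getD 0 never takes the default
def vdStep (acc : List Int) (x : Int) : List Int :=
  acc ++ [(PySem.List.pyGet? acc (-1)).getD 0 + x]

def validate_distribution_alt (dist : List Int) (n : Int) (k : Int) : Bool :=
  let pfx := dist.foldl vdStep [0]
  decide ((pfx.length : Int) = k + 1) && decide ((PySem.List.pyGet? pfx (-1)).getD 0 = n)
    && (pfx == PySem.List.sorted pfx (fun y => y) false)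

-- ===== PRECONDITION & SPEC =====
def Spec_validate_distribution (dist : List Int) (n : Int) (k : Int) (out : Bool) : Prop := out = validate_distribution_alt dist n k
instance (dist : List Int) (n : Int) (k : Int) (out : Bool) : Decidable (Spec_validate_distribution dist n k out) := by unfold Spec_validate_distribution; infer_instance

-- ===== CLAIM (what is proved, stated in full; the proofs are below) =====
def Claim_equal_validate_distribution : Prop := ∀ (dist : List Int) (n : Int) (k : Int), Dom_validate_distribution dist n k → Spec_validate_distribution dist n k (validate_distribution dist n k)

-- ===== LEMMAS AND PROOFS =====

-- the appending loop builds exactly the scanl of running sums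
theorem vd_fold_scan (l : List Int) : ∀ (acc : List Int) (t : Int),
    l.foldl vdStep (acc ++ [t]) = acc ++ List.scanl (· + ·) t l := by
  induction l with
  | nil => intro acc t; simp [List.scanl]
  | cons x xs ih =>
    intro acc t
    have hstep : vdStep (acc ++ [t]) x = (acc ++ [t]) ++ [t + x] := by
      simp [vdStep, PySem.List.pyGet?_neg_one_append_singleton]
    simp only [List.foldl_cons, hstep, ih (acc ++ [t]) (t + x), List.scanl]
    simp

-- last entry of the scanl is the total
theorem vd_scan_last (l : List Int) : ∀ (t : Int),
    (PySem.List.pyGet? (List.scanl (· + ·) t l) (-1)).getD 0 = l.foldl (· + ·) t := by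
  induction l with
  | nil => intro t; simp [PySem.List.pyGet?_neg_one]
  | cons x xs ih =>
    intro t
    simp only [PySem.List.pyGet?_neg_one, List.foldl_cons] at *
    cases xs with
    | nil => simp
    | cons y ys =>
      rw [List.scanl_cons, List.scanl_cons, List.getLast?_cons_cons, ← List.scanl_cons,
        ih (t + x)]

-- the scanl is adjacent-nondecreasing iff every increment is nonnegative
theorem vd_scan_chain (l : List Int) : ∀ (t : Int),
    List.IsChain (· ≤ ·) (List.scanl (· + ·) t l) ↔ ∀ x ∈ l, (0:Int) ≤ x := by
  induction l with
  | nil => intro t; simp [List.scanl]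
  | cons x xs ih =>
    intro t
    cases xs with
    | nil => simp [List.scanl_cons, List.scanl_nil]
    | cons y ys =>
      rw [List.scanl_cons, List.scanl_cons, List.isChain_cons_cons, ← List.scanl_cons,
        ih (t + x)]
      constructor
      · rintro ⟨h1, h3⟩ z hz
        rcases List.mem_cons.mp hz with rfl | hz
        · omega
        · exact h3 z hz
      · intro h
        exact ⟨by have := h x (by simp); omega, fun z hz => h z (List.mem_cons_of_mem _ hz)⟩

-- equality with its own sort characterises Pairwise (· ≤ ·)
theorem vd_sorted_self (xs : List Int) :
    ((xs == PySem.List.sorted xs (fun y => y) false) = true) ↔ xs.Pairwise (· ≤ ·) := by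
  constructor
  · intro h
    have he : xs = PySem.List.sorted xs (fun y => y) false := by exact_mod_cast beq_iff_eq.mp h
    have hp := PySem.List.sorted_pairwise xs (fun y => y)
    rw [← he] at hp
    exact hp
  · intro h
    have := PySem.List.sorted_eq_self_of_pairwise (xs := xs) (key := fun y => y) h
    rw [this]
    simp

-- ===== VERDICT (by name: the statement is the Claim_ definition above) =====
theorem validate_distribution_spec : Claim_equal_validate_distribution := by
  intro dist n k _
  unfold Spec_validate_distribution validate_distribution validate_distribution_alt
  have hp : dist.foldl vdStep [0] = List.scanl (· + ·) 0 dist := by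
    simpa using vd_fold_scan dist [] 0
  rw [hp]
  by_cases hl : (dist.length : Int) = k
  · by_cases hs : dist.foldl (· + ·) 0 = n
    · by_cases hneg : ∀ x ∈ dist, (0:Int) ≤ x
      · have hany : dist.any (fun x => x < 0) = false := by
          simp only [List.any_eq_false, decide_eq_true_eq]
          intro x hx; have := hneg x hx; omega
        have hc3 : ((List.scanl (· + ·) 0 dist == PySem.List.sorted (List.scanl (· + ·) 0 dist) (fun y => y) false)) = true := by
          rw [vd_sorted_self]
          exact (List.isChain_iff_pairwise).mp ((vd_scan_chain dist 0).mpr hneg)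
        simp [hl, hs, hany, hc3, List.length_scanl, vd_scan_last]
      · have hany : dist.any (fun x => x < 0) = true := by
          simp only [List.any_eq_true, decide_eq_true_eq]
          push Not at hneg
          obtain ⟨x, hx, hxneg⟩ := hneg
          exact ⟨x, hx, by omega⟩
        have hc3 : ((List.scanl (· + ·) 0 dist == PySem.List.sorted (List.scanl (· + ·) 0 dist) (fun y => y) false)) = false := by
          rw [Bool.eq_false_iff]
          intro h
          exact hneg ((vd_scan_chain dist 0).mp ((List.isChain_iff_pairwise).mpr ((vd_sorted_self _).mp h)))
        simp [hl, hs, hany, hc3]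
    · simp [hl, hs, vd_scan_last]
  · have : ¬ ((dist.length : Int) + 1 = k + 1) := by omega
    simp [hl, List.length_scanl, this]
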